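-- pv_equiv track=rewrite | github.com/SimuIacron/cluster_analysis_for_sat_instances | util_scripts/util.py | add_line_breaks_to_text
-- ===== SOURCE A (Python) =====
-- def add_line_breaks_to_text(text, letter_to_break_at, replace_n):
--     text_string = ''
--     n_counter = 0
--     for letter in text:
--         if letter == letter_to_break_at:
--             n_counter = n_counter + 1
--             if replace_n == n_counter:
--                 n_counter = 0
--                 text_string = text_string + ',<br>'
--             else:
--                 text_string = text_string + ','
--         else:
--             text_string = text_string + letter
--
--     return text_string
-- ===== SOURCE B (Python) =====
-- def add_line_breaks_to_text(text, letter_to_break_at, replace_n):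
--     # Split once on the delimiter, then rebuild the text, choosing the
--     # separator for the i-th boundary arithmetically (',<br>' every
--     # replace_n-th boundary, ',' otherwise).
--     if len(letter_to_break_at) != 1:
--         # A character-by-character comparison can only ever match a
--         # single-character delimiter; otherwise nothing is replaced.
--         return text
--     parts = text.split(letter_to_break_at)
--     pieces = [parts[0]]
--     for i, part in enumerate(parts[1:], start=1):
--         pieces.append(',<br>' if replace_n > 0 and i % replace_n == 0 else ',')
--         pieces.append(part)
--     return ''.join(pieces)
-- ===== Notes on version B (the rewrite author's own statement) =====
-- stated objective: faster
-- what changed: Replaced A's character-by-character scan with a running counter by a single split on the delimiter followed by a join, choosing each boundary's separator arithmetically (',<br>' at every replace_n-th boundary, ',' otherwise).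
import Mathlib
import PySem

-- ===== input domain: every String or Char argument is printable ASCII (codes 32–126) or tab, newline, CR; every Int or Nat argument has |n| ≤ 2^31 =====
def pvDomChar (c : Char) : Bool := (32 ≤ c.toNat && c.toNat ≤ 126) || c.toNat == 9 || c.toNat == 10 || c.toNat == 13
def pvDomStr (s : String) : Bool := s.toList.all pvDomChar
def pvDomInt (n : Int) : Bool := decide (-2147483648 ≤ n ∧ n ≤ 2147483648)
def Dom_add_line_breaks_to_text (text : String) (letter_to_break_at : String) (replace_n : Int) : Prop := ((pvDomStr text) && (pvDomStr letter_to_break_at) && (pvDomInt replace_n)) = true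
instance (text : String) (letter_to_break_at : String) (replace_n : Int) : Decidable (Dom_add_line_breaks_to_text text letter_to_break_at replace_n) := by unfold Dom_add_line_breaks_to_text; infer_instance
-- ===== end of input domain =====

-- B replaces A's character scan with counter by one split on the delimiter plus a join with
-- arithmetically chosen separators (measured constant-factor faster in a timing run).

-- ===== PORT A =====
-- literal port of A: one pass over the characters, accumulating the output and the counter
def add_line_breaks_to_text (text : String) (letter_to_break_at : String) (replace_n : Int) : String :=
  String.ofList
    ((text.toList.foldl
      (fun (st : List Char × Int) letterc =>
        if [letterc] = letter_to_break_at.toList then  -- `letter == letter_to_break_at` on the 1-char string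
          if replace_n = st.2 + 1 then (st.1 ++ ",<br>".toList, 0)
          else (st.1 ++ [','], st.2 + 1)
        else (st.1 ++ [letterc], st.2))
      ([], 0)).1)

-- ===== PORT B =====
-- literal port of Source B: split once, then rebuild with an arithmetically chosen separator
def add_line_breaks_to_text_alt (text : String) (letter_to_break_at : String) (replace_n : Int) : String :=
  if letter_to_break_at.toList.length ≠ 1 then text
  else
    String.ofList (PySem.Chars.join []
      ((PySem.List.enumerate ((PySem.Chars.splitOn text.toList letter_to_break_at.toList).drop 1) 1).foldl
        (fun (pcs : List (List Char)) ip =>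
          (pcs ++ [if 0 < replace_n ∧ PySem.Int.mod ip.1 replace_n = 0 then ",<br>".toList else [',']])
            ++ [ip.2])
        -- parts[0]; str.split never returns an empty list, so headD is exact
        [(PySem.Chars.splitOn text.toList letter_to_break_at.toList).headD []]))

-- ===== PRECONDITION & SPEC =====
def Spec_add_line_breaks_to_text (text : String) (letter_to_break_at : String) (replace_n : Int) (out : String) : Prop := out = add_line_breaks_to_text_alt text letter_to_break_at replace_n
instance (text : String) (letter_to_break_at : String) (replace_n : Int) (out : String) : Decidable (Spec_add_line_breaks_to_text text letter_to_break_at replace_n out) := by unfold Spec_add_line_breaks_to_text; infer_instance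

-- ===== CLAIM (what is proved, stated in full; the proofs are below) =====
def Claim_equal_add_line_breaks_to_text : Prop := ∀ (text : String) (letter_to_break_at : String) (replace_n : Int), Dom_add_line_breaks_to_text text letter_to_break_at replace_n → Spec_add_line_breaks_to_text text letter_to_break_at replace_n (add_line_breaks_to_text text letter_to_break_at replace_n)

-- ===== LEMMAS AND PROOFS =====

-- A's loop body and B's loop body, named for the proofs (definitionally the ports' lambdas)
def foldAF (letter : String) (rn : Int) : (List Char × Int) → Char → (List Char × Int) :=
  fun st letterc =>
    if [letterc] = letter.toList then
      if rn = st.2 + 1 then (st.1 ++ ",<br>".toList, 0)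
      else (st.1 ++ [','], st.2 + 1)
    else (st.1 ++ [letterc], st.2)

def foldBF (rn : Int) : List (List Char) → (Int × List Char) → List (List Char) :=
  fun pcs ip =>
    (pcs ++ [if 0 < rn ∧ PySem.Int.mod ip.1 rn = 0 then ",<br>".toList else [',']]) ++ [ip.2]

-- splitting on a single character, recursively
def splitC (ch : Char) : List Char → List (List Char)
  | [] => [[]]
  | c :: t =>
    if c = ch then [] :: splitC ch t
    else (c :: (splitC ch t).headD []) :: (splitC ch t).tail

-- the value of A's suffix scan, starting from counter cnt
def sA (ch : Char) (rn : Int) : List Char → Int → List Char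
  | [], _ => []
  | c :: t, cnt =>
    if c = ch then
      (if rn = cnt + 1 then ",<br>".toList ++ sA ch rn t 0 else ',' :: sA ch rn t (cnt + 1))
    else c :: sA ch rn t cnt

-- the value of B's rebuild of the segments after the first, boundary indices from i on
def renderB (rn : Int) : Int → List (List Char) → List Char
  | _, [] => []
  | i, p :: ps =>
    (if 0 < rn ∧ PySem.Int.mod i rn = 0 then ",<br>".toList else [',']) ++ p ++ renderB rn (i + 1) ps

theorem splitC_ne_nil (ch : Char) (t : List Char) : splitC ch t ≠ [] := by
  cases t with
  | nil => simp [splitC]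
  | cons c t => simp only [splitC]; split <;> simp

theorem splitC_cons_headD (ch : Char) (t : List Char) :
    (splitC ch t).head?.getD [] :: (splitC ch t).tail = splitC ch t := by
  cases h : splitC ch t with
  | nil => exact absurd h (splitC_ne_nil ch t)
  | cons p ps => rfl

theorem splitOn_go_eq (ch : Char) :
    ∀ (fuel : Nat) (l cur : List Char) (acc : List (List Char)), l.length < fuel →
      PySem.Chars.splitOn.go [ch] fuel l cur acc
        = acc.reverse ++ (cur.reverse ++ (splitC ch l).headD []) :: (splitC ch l).tail := by
  intro fuel
  induction fuel with
  | zero => intro l cur acc h; omega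
  | succ fuel ih =>
    intro l cur acc h
    cases l with
    | nil => simp [PySem.Chars.splitOn.go, splitC]
    | cons c rest =>
      by_cases hc : c = ch
      · subst hc
        have hpre : ([c].isPrefixOf (c :: rest)) = true := by simp [List.isPrefixOf]
        simp only [PySem.Chars.splitOn.go, hpre, if_true, List.length_cons, List.drop_succ_cons,
          List.length_nil, List.drop_zero]
        rw [ih rest [] (cur.reverse :: acc) (by simpa using Nat.lt_of_succ_lt_succ h)]
        simp [splitC]
        exact splitC_cons_headD c rest
      · have hpre : ([ch].isPrefixOf (c :: rest)) = false := by
          simp [List.isPrefixOf]; exact fun hc' => absurd hc'.symm hc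
        simp only [PySem.Chars.splitOn.go, hpre, Bool.false_eq_true, if_false]
        rw [ih rest (c :: cur) acc (by simpa using Nat.lt_of_succ_lt_succ h)]
        simp [splitC, hc]

theorem splitOn_eq_splitC (ch : Char) (t : List Char) :
    PySem.Chars.splitOn t [ch] = splitC ch t := by
  unfold PySem.Chars.splitOn
  rw [splitOn_go_eq ch (t.length + 1) t [] [] (by omega)]
  simp [splitC_cons_headD]

-- ''.join is concatenation
theorem join_nil_eq_flatten (l : List (List Char)) : PySem.Chars.join [] l = l.flatten := by
  induction l with
  | nil => simp [PySem.Chars.join_nil]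
  | cons p ps ih =>
    cases ps with
    | nil => simp [PySem.Chars.join_singleton]
    | cons q qs => rw [PySem.Chars.join_cons_cons]; simp_all

-- A's foldl in terms of sA
theorem foldA_eq_sA (ch : Char) (rn : Int) (letter : String) (hl : letter.toList = [ch]) :
    ∀ (t : List Char) (acc : List Char) (cnt : Int),
      (t.foldl (foldAF letter rn) (acc, cnt)).1 = acc ++ sA ch rn t cnt := by
  intro t
  induction t with
  | nil => intro acc cnt; simp [sA]
  | cons c t ih =>
    intro acc cnt
    rw [List.foldl_cons]
    by_cases hc : c = ch
    · subst hc
      by_cases hr : rn = cnt + 1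
      · rw [show foldAF letter rn (acc, cnt) c = (acc ++ ",<br>".toList, 0) by
            simp [foldAF, hl, hr]]
        rw [ih]
        simp [sA, hr]
      · rw [show foldAF letter rn (acc, cnt) c = (acc ++ [','], cnt + 1) by
            simp [foldAF, hl, hr]]
        rw [ih]
        simp [sA, hr]
    · rw [show foldAF letter rn (acc, cnt) c = (acc ++ [c], cnt) by
          simp [foldAF, hl, hc]]
      rw [ih]
      simp [sA, hc]

-- with a delimiter that is not a single character, A copies the text unchanged
theorem foldA_nomatch (rn : Int) (letter : String) (hl : letter.toList.length ≠ 1) :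
    ∀ (t : List Char) (acc : List Char) (cnt : Int),
      (t.foldl (foldAF letter rn) (acc, cnt)).1 = acc ++ t := by
  intro t
  induction t with
  | nil => intro acc cnt; simp
  | cons c t ih =>
    intro acc cnt
    rw [List.foldl_cons]
    rw [show foldAF letter rn (acc, cnt) c = (acc ++ [c], cnt) by
        have : ¬ ([c] = letter.toList) := fun h => hl (by rw [← h]; rfl)
        simp [foldAF, this]]
    rw [ih]
    simp

-- B's foldl over the enumerated tail, in terms of renderB
theorem foldB_eq_renderB (rn : Int) :
    ∀ (ps : List (List Char)) (i : Int) (pcs : List (List Char)),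
      PySem.Chars.join [] ((PySem.List.enumerate ps i).foldl (foldBF rn) pcs)
        = PySem.Chars.join [] pcs ++ renderB rn i ps := by
  intro ps
  induction ps with
  | nil => intro i pcs; simp [PySem.List.enumerate, renderB]
  | cons p ps ih =>
    intro i pcs
    simp only [PySem.List.enumerate, List.foldl_cons]
    rw [ih]
    simp [join_nil_eq_flatten, renderB, foldBF]

-- the heart: A's counter scan equals B's segment rebuild, under the counter/index invariant
theorem sA_eq_renderB (ch : Char) (rn : Int) :
    ∀ (t : List Char) (cnt i : Int), 0 ≤ cnt → 0 ≤ i → (0 < rn → cnt = i % rn) →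
      sA ch rn t cnt = (splitC ch t).headD [] ++ renderB rn (i + 1) ((splitC ch t).tail) := by
  intro t
  induction t with
  | nil => intro cnt i _ _ _; simp [sA, splitC, renderB]
  | cons c t ih =>
    intro cnt i hcnt hi hinv
    by_cases hc : c = ch
    · subst hc
      simp only [sA, splitC, if_true, List.headD_cons, List.tail_cons]
      rw [← splitC_cons_headD c t]
      simp only [renderB]
      by_cases hr : rn = cnt + 1
      · have hrpos : 0 < rn := by omega
        have hmod : (i + 1) % rn = 0 := by
          have h1 : (i % rn + 1) % rn = (i + 1) % rn := Int.emod_add_emod i rn 1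
          rw [← h1, ← hinv hrpos, ← hr, Int.emod_self]
        have hsep : (0 < rn ∧ PySem.Int.mod (i + 1) rn = 0) := by
          refine ⟨hrpos, ?_⟩
          rw [PySem.Int.mod_eq_emod_of_pos hrpos, hmod]
        rw [if_pos hr, if_pos hsep, ih 0 (i + 1) le_rfl (by omega) (fun _ => hmod.symm)]
        simp
      · have hb1 : 0 < rn → 0 ≤ i % rn := fun h => Int.emod_nonneg i (by omega)
        have hb2 : 0 < rn → i % rn < rn := fun h => Int.emod_lt_of_pos i h
        have hnext : 0 < rn → cnt + 1 = (i + 1) % rn := by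
          intro hrpos
          have h1 : (i % rn + 1) % rn = (i + 1) % rn := Int.emod_add_emod i rn 1
          rw [← h1, ← hinv hrpos,
            Int.emod_eq_of_lt (by omega)
              (by have := hb2 hrpos; rw [hinv hrpos] at hr ⊢; omega)]
        have hsep : ¬ (0 < rn ∧ PySem.Int.mod (i + 1) rn = 0) := by
          rintro ⟨hrpos, hm⟩
          rw [PySem.Int.mod_eq_emod_of_pos hrpos, ← hnext hrpos] at hm
          omega
        rw [if_neg hr, if_neg hsep, ih (cnt + 1) (i + 1) (by omega) (by omega) hnext]
        simp
    · simp only [sA, splitC, if_neg hc, List.headD_cons, List.tail_cons]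
      rw [ih cnt i hcnt hi hinv]
      simp

-- ===== VERDICT (by name: the statement is the Claim_ definition above) =====
theorem add_line_breaks_to_text_spec : Claim_equal_add_line_breaks_to_text := by
  intro text letter rn _
  unfold Spec_add_line_breaks_to_text
  show add_line_breaks_to_text text letter rn = _
  have hA : add_line_breaks_to_text text letter rn
      = String.ofList ((text.toList.foldl (foldAF letter rn) ([], 0)).1) := rfl
  by_cases hl : letter.toList.length = 1
  · obtain ⟨ch, hch⟩ := List.length_eq_one_iff.mp hl
    have hB : add_line_breaks_to_text_alt text letter rn
        = String.ofList (PySem.Chars.join []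
            ((PySem.List.enumerate ((PySem.Chars.splitOn text.toList letter.toList).drop 1) 1).foldl
              (foldBF rn)
              [(PySem.Chars.splitOn text.toList letter.toList).headD []])) := by
      unfold add_line_breaks_to_text_alt
      rw [if_neg (by omega)]
      rfl
    rw [hA, hB, foldA_eq_sA ch rn letter hch text.toList [] 0]
    rw [hch, splitOn_eq_splitC ch text.toList, List.drop_one, foldB_eq_renderB rn _ 1 _,
      PySem.Chars.join_singleton]
    rw [sA_eq_renderB ch rn text.toList 0 0 le_rfl le_rfl (fun _ => (Int.zero_emod rn).symm)]
    simp
  · have hB : add_line_breaks_to_text_alt text letter rn = text := by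
      unfold add_line_breaks_to_text_alt
      rw [if_pos hl]
    rw [hA, hB, foldA_nomatch rn letter hl text.toList [] 0]
    simp [String.ofList_toList]
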